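-- pv_equiv track=rewrite | github.com/KillianDeGeest1999/random_scripts | trimmer.py | find_final_stop_codon
-- ===== SOURCE A (Python) =====
-- def find_final_stop_codon(sequence):
--     stop_codons = ["TAA", "TAG", "TGA"]
--     final_stop = -1
--     for codon in stop_codons:
--         stop_pos = sequence.upper().rfind(codon)
--         if stop_pos != -1 and (final_stop == -1 or stop_pos > final_stop):
--             final_stop = stop_pos
--     return final_stop
-- ===== SOURCE B (Python) =====
-- def find_final_stop_codon(sequence):
--     seq = sequence.upper()
--     stops = ("TAA", "TAG", "TGA")
--     for i in range(len(seq) - 3, -1, -1):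
--         if seq[i:i+3] in stops:
--             return i
--     return -1
-- ===== Notes on version B (the rewrite author's own statement) =====
-- stated objective: simpler
-- what changed: Replaces three separate rfind scans combined by a max-update loop with a single right-to-left position scan that returns the first index whose 3-char slice is a stop codon; the sequence is uppercased once instead of once per codon.
import Mathlib
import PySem

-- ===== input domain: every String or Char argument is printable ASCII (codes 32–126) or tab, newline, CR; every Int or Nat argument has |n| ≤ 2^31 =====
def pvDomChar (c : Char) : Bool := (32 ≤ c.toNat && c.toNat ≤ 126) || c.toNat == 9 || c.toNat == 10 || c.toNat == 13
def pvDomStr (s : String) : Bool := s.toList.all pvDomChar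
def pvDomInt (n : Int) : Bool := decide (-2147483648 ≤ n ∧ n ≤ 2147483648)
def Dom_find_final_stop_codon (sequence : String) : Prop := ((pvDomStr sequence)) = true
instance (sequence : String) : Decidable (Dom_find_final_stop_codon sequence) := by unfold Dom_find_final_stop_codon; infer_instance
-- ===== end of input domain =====

-- B replaces A's three rfind scans + max-update loop by one right-to-left position scan
-- over a single uppercased copy, checking 3-char slices against the stop-codon set (simpler).


-- ===== PORT A =====
def find_final_stop_codon (sequence : String) : Int :=
  let stop_codons : List String := ["TAA", "TAG", "TGA"]
  stop_codons.foldl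
    (fun final_stop codon =>
      let stop_pos := PySem.Str.rfind (PySem.Str.upper sequence) codon
      if stop_pos ≠ -1 ∧ (final_stop = -1 ∨ stop_pos > final_stop) then stop_pos
      else final_stop)
    (-1)

-- ===== PORT B =====
def altStops : List (List Char) := [['T','A','A'], ['T','A','G'], ['T','G','A']]

-- the loop 'for i in range(len(seq)-3, -1, -1): if seq[i:i+3] in stops: return i', i counting down
def altGo (seq : List Char) : Nat → Int
  | 0 => if PySem.List.slice seq (some ((0:Nat):Int)) (some (((0:Nat):Int)+3)) ∈ altStops then ((0:Nat):Int) else -1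
  | k+1 =>
      if PySem.List.slice seq (some ((k+1:Nat):Int)) (some (((k+1:Nat):Int)+3)) ∈ altStops then ((k+1:Nat):Int)
      else altGo seq k

def find_final_stop_codon_alt (sequence : String) : Int :=
  let seq := PySem.Chars.upper sequence.toList
  if seq.length < 3 then -1 else altGo seq (seq.length - 3)

-- ===== PRECONDITION & SPEC =====
def Spec_find_final_stop_codon (sequence : String) (out : Int) : Prop := out = find_final_stop_codon_alt sequence
instance (sequence : String) (out : Int) : Decidable (Spec_find_final_stop_codon sequence out) := by unfold Spec_find_final_stop_codon; infer_instance

-- ===== CLAIM (what is proved, stated in full; the proofs are below) =====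
def Claim_equal_find_final_stop_codon : Prop := ∀ (sequence : String), Dom_find_final_stop_codon sequence → Spec_find_final_stop_codon sequence (find_final_stop_codon sequence)

-- ===== LEMMAS AND PROOFS =====

lemma slice_i3 (l : List Char) (i : Nat) :
    PySem.List.slice l (some ((i:Nat):Int)) (some (((i:Nat):Int)+3)) = (l.drop i).take 3 := by
  have := PySem.List.slice_natCast_add (xs := l) (j := i) (n := 3)
  simpa using this

lemma take3_eq_iff (c l : List Char) (hc : c.length = 3) : l.take 3 = c ↔ c <+: l := by
  rw [List.prefix_iff_eq_take, hc, eq_comm]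

lemma go_ge (s c : List Char) (k : Nat) : -1 ≤ PySem.Chars.rfind.go s c k := by
  induction k with
  | zero => simp [PySem.Chars.rfind.go]; split <;> omega
  | succ k ih => simp [PySem.Chars.rfind.go]; split <;> omega

lemma go_le (s c : List Char) (k : Nat) : PySem.Chars.rfind.go s c k ≤ (k:Int) := by
  induction k with
  | zero => simp [PySem.Chars.rfind.go]; split <;> omega
  | succ k ih => simp [PySem.Chars.rfind.go]; split <;> omega

lemma fail_short (s c : List Char) (k : Nat) (hc : c.length = 3) (h : s.length < k + 3) :
    c.isPrefixOf (s.drop k) = false := by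
  rw [Bool.eq_false_iff]
  intro hp
  have hpre : c <+: s.drop k := List.isPrefixOf_iff_prefix.mp hp
  have := hpre.length_le
  simp [hc] at this
  omega

lemma go_high (s c : List Char) (hc : c.length = 3) :
    ∀ k, s.length ≤ k + 3 → PySem.Chars.rfind.go s c k = PySem.Chars.rfind.go s c (s.length - 3) := by
  intro k
  induction k with
  | zero =>
      intro h
      have : s.length - 3 = 0 := by omega
      rw [this]
  | succ k ih =>
      intro h
      by_cases hk : s.length ≤ k + 3
      · have hfail : c.isPrefixOf (s.drop (k+1)) = false := fail_short s c (k+1) hc (by omega)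
        simp [PySem.Chars.rfind.go, hfail]
        exact ih hk
      · have : s.length - 3 = k + 1 := by omega
        rw [this]

lemma go_zero_short (s c : List Char) (hc : c.length = 3) (h : s.length < 3) :
    PySem.Chars.rfind.go s c 0 = -1 := by
  have hfail : c.isPrefixOf (s.drop 0) = false := fail_short s c 0 hc (by omega)
  simp at hfail
  simp [PySem.Chars.rfind.go, hfail]

lemma altGo_eq_max (u : List Char) (k : Nat) :
    altGo u k = max (max (PySem.Chars.rfind.go u ['T','A','A'] k)
                         (PySem.Chars.rfind.go u ['T','A','G'] k))
                    (PySem.Chars.rfind.go u ['T','G','A'] k) := by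
  induction k with
  | zero =>
      rw [altGo, slice_i3]
      simp only [List.drop_zero, altStops, List.mem_cons,
        take3_eq_iff _ _ (by decide : (['T','A','A'] : List Char).length = 3),
        take3_eq_iff _ _ (by decide : (['T','A','G'] : List Char).length = 3),
        take3_eq_iff _ _ (by decide : (['T','G','A'] : List Char).length = 3)]
      simp only [PySem.Chars.rfind.go, ← List.isPrefixOf_iff_prefix]
      by_cases h1 : (['T','A','A'] : List Char).isPrefixOf u <;>
        by_cases h2 : (['T','A','G'] : List Char).isPrefixOf u <;>
          by_cases h3 : (['T','G','A'] : List Char).isPrefixOf u <;>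
            simp [h1, h2, h3]
  | succ k ih =>
      rw [altGo, slice_i3]
      have g1 := go_le u ['T','A','A'] k
      have g2 := go_le u ['T','A','G'] k
      have g3 := go_le u ['T','G','A'] k
      simp only [altStops, List.mem_cons,
        take3_eq_iff _ _ (by decide : (['T','A','A'] : List Char).length = 3),
        take3_eq_iff _ _ (by decide : (['T','A','G'] : List Char).length = 3),
        take3_eq_iff _ _ (by decide : (['T','G','A'] : List Char).length = 3)]
      conv_rhs => simp only [PySem.Chars.rfind.go]
      simp only [← List.isPrefixOf_iff_prefix]
      by_cases h1 : (['T','A','A'] : List Char).isPrefixOf (u.drop (k+1)) <;>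
        by_cases h2 : (['T','A','G'] : List Char).isPrefixOf (u.drop (k+1)) <;>
          by_cases h3 : (['T','G','A'] : List Char).isPrefixOf (u.drop (k+1)) <;>
            simp [h1, h2, h3, ih] <;> omega

-- ===== VERDICT (by name: the statement is the Claim_ definition above) =====
theorem find_final_stop_codon_spec : Claim_equal_find_final_stop_codon := by
  intro s _
  unfold Spec_find_final_stop_codon find_final_stop_codon find_final_stop_codon_alt
  set u := PySem.Chars.upper s.toList with hu
  have hlist : (PySem.Str.upper s).toList = u := by
    simp [hu, PySem.Str.toList_upper]
  have key : ∀ c : List Char, c.length = 3 →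
      PySem.Chars.rfind u c = PySem.Chars.rfind.go u c (u.length - 3) := by
    intro c hc
    unfold PySem.Chars.rfind
    exact go_high u c hc u.length (by omega)
  have k1 := key ['T','A','A'] (by decide)
  have k2 := key ['T','A','G'] (by decide)
  have k3 := key ['T','G','A'] (by decide)
  simp only [List.foldl, PySem.Str.rfind_eq, hlist,
    (by decide : "TAA".toList = ['T','A','A']),
    (by decide : "TAG".toList = ['T','A','G']),
    (by decide : "TGA".toList = ['T','G','A']),
    k1, k2, k3, altGo_eq_max]
  by_cases hlen : u.length < 3
  · have hz : u.length - 3 = 0 := by omega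
    rw [hz, go_zero_short u _ (by decide) hlen, go_zero_short u _ (by decide) hlen,
      go_zero_short u _ (by decide) hlen]
    simp [hlen]
  · have g1 := go_ge u ['T','A','A'] (u.length - 3)
    have g2 := go_ge u ['T','A','G'] (u.length - 3)
    have g3 := go_ge u ['T','G','A'] (u.length - 3)
    simp only [if_neg hlen]
    split_ifs <;> omega
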